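-- pv_equiv track=rewrite | github.com/PantherP825/Cred-Shadow | utils/hash_utils.py | validate_hash_format
-- ===== SOURCE A (Python) =====
-- def validate_hash_format(hash_string):
--     """
--     Validate NTLM hash format without parsing.
--
--     Args:
--         hash_string (str): Hash string to validate
--
--     Returns:
--         bool: True if format is valid
--     """
--     if not hash_string:
--         return False
--
--     hash_string = hash_string.strip()
--
--     # Check for colon separator
--     if ':' in hash_string:
--         parts = hash_string.split(':')
--         if len(parts) != 2:
--             return False
--         lm_hash, nt_hash = parts
--
--         # Validate LM hash (32 hex chars or empty)
--         if lm_hash and (len(lm_hash) != 32 or not all(c in '0123456789abcdefABCDEF' for c in lm_hash)):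
--             return False
--
--         # Validate NT hash (32 hex chars)
--         if len(nt_hash) != 32 or not all(c in '0123456789abcdefABCDEF' for c in nt_hash):
--             return False
--     else:
--         # NT hash only
--         if len(hash_string) != 32 or not all(c in '0123456789abcdefABCDEF' for c in hash_string):
--             return False
--
--     return True
-- ===== SOURCE B (Python) =====
-- def validate_hash_format(hash_string):
--     if not hash_string:
--         return False
--     colons = 0
--     seg_len = [0, 0]
--     seg_hex = [True, True]
--     for c in hash_string.strip():
--         if c == ':':
--             colons += 1
--             if colons > 1:
--                 return False
--         else:
--             seg_len[colons] += 1
--             if c not in '0123456789abcdefABCDEF':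
--                 seg_hex[colons] = False
--     if colons == 0:
--         return seg_len[0] == 32 and seg_hex[0]
--     return (seg_len[0] == 0 or (seg_len[0] == 32 and seg_hex[0])) and seg_len[1] == 32 and seg_hex[1]
-- ===== Notes on version B (the rewrite author's own statement) =====
-- stated objective: alternative
-- what changed: A splits the string at the colon separator into parts and validates each part with staged length/all-hex passes; B is a single-pass character state machine that accumulates per-segment length and hex-ness in a small accumulator (colon count, two lengths, two flags) and decides at the end, rejecting a second colon as soon as it is seen.
import Mathlib
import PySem

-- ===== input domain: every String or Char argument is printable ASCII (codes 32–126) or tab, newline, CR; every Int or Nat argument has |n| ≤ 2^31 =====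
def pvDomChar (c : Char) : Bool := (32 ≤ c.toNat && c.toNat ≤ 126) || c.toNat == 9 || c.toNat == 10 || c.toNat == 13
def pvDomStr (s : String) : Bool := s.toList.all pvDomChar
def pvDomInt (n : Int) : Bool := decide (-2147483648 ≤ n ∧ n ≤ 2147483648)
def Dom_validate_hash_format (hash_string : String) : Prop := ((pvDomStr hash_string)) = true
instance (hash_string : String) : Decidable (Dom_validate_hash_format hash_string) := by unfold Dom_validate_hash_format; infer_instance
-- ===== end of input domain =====

-- B replaces A's split-on-colon / staged per-part validation by a single-pass character
-- state machine accumulating per-segment length and hex-ness (objective: alternative).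


-- ===== PORT A =====
-- the hex alphabet literal '0123456789abcdefABCDEF' shared by both Pythons
def hexDigits : List Char := "0123456789abcdefABCDEF".toList

def validate_hash_format (hash_string : String) : Bool :=
  if hash_string.toList = [] then false    -- `if not hash_string`
  else
    let s := PySem.Chars.strip hash_string.toList
    if PySem.Chars.isIn [':'] s then
      let parts := PySem.Chars.splitOn s [':']
      if parts.length != 2 then false
      else
        match parts with
        | [lm_hash, nt_hash] =>
          -- `c in '0123…ABCDEF'` for a single char c is list membership (exact)
          if !lm_hash.isEmpty && (lm_hash.length != 32 || !lm_hash.all (fun c => hexDigits.contains c)) then false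
          else if nt_hash.length != 32 || !nt_hash.all (fun c => hexDigits.contains c) then false
          else true
        | _ => false
    else
      if s.length != 32 || !s.all (fun c => hexDigits.contains c) then false
      else true

-- ===== PORT B =====
-- the for-loop of Source B: state = (colons, seg_len[0], seg_hex[0], seg_len[1], seg_hex[1]);
-- `none` models the early `return False` on a second colon
def altLoop : List Char → Nat → Nat → Bool → Nat → Bool → Option (Nat × Nat × Bool × Nat × Bool)
  | [], c, l0, h0, l1, h1 => some (c, l0, h0, l1, h1)
  | x :: xs, c, l0, h0, l1, h1 =>
    if x = ':' then
      if c + 1 > 1 then none else altLoop xs (c + 1) l0 h0 l1 h1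
    else if c = 0 then altLoop xs c (l0 + 1) (h0 && hexDigits.contains x) l1 h1
    else altLoop xs c l0 h0 (l1 + 1) (h1 && hexDigits.contains x)

def validate_hash_format_alt (hash_string : String) : Bool :=
  if hash_string.toList = [] then false    -- `if not hash_string`
  else
    match altLoop (PySem.Chars.strip hash_string.toList) 0 0 true 0 true with
    | none => false
    | some (c, l0, h0, l1, h1) =>
      if c = 0 then (l0 == 32) && h0
      else ((l0 == 0) || ((l0 == 32) && h0)) && ((l1 == 32) && h1)

-- ===== PRECONDITION & SPEC =====
def Spec_validate_hash_format (hash_string : String) (out : Bool) : Prop := out = validate_hash_format_alt hash_string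
instance (hash_string : String) (out : Bool) : Decidable (Spec_validate_hash_format hash_string out) := by unfold Spec_validate_hash_format; infer_instance

-- ===== CLAIM (what is proved, stated in full; the proofs are below) =====
def Claim_equal_validate_hash_format : Prop := ∀ (hash_string : String), Dom_validate_hash_format hash_string → Spec_validate_hash_format hash_string (validate_hash_format hash_string)

-- ===== LEMMAS AND PROOFS =====

-- fuel-free form of PySem.Chars.splitOn.go specialised to the 1-char separator
def Fsplit (c : Char) (pre : List Char) : List Char → List (List Char)
  | [] => [pre]
  | x :: xs => if x = c then pre :: Fsplit c [] xs else Fsplit c (pre ++ [x]) xs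

theorem go_eq_Fsplit (c : Char) (fuel : Nat) (l cur : List Char) (acc : List (List Char))
    (h : l.length < fuel) :
    PySem.Chars.splitOn.go [c] fuel l cur acc = acc.reverse ++ Fsplit c cur.reverse l := by
  induction fuel generalizing l cur acc with
  | zero => omega
  | succ n ih =>
    cases l with
    | nil => simp [PySem.Chars.splitOn.go, Fsplit]
    | cons x rest =>
      by_cases hx : x = c
      · subst hx
        rw [PySem.Chars.splitOn.go]
        simp [List.isPrefixOf, ih rest [] (cur.reverse :: acc) (by simpa using Nat.lt_of_succ_lt_succ h), Fsplit]
      · rw [PySem.Chars.splitOn.go]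
        simp [List.isPrefixOf, hx, ih rest (x :: cur) acc (by simpa using Nat.lt_of_succ_lt_succ h), Fsplit, Ne.symm hx]

theorem splitOn_single (c : Char) (l : List Char) :
    PySem.Chars.splitOn l [c] = Fsplit c [] l := by
  rw [PySem.Chars.splitOn]
  simpa using go_eq_Fsplit c (l.length + 1) l [] [] (by omega)

-- Fsplit as "chars before the first c" and the recursive rest
theorem Fsplit_eq (c : Char) : ∀ (l pre : List Char),
    Fsplit c pre l = (pre ++ l.takeWhile (· != c)) ::
      (match l.dropWhile (· != c) with
       | [] => []
       | _ :: rest => Fsplit c [] rest) := by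
  intro l
  induction l with
  | nil => intro pre; simp [Fsplit]
  | cons x xs ih =>
    intro pre
    by_cases hx : x = c
    · subst hx; simp [Fsplit]
    · simp [Fsplit, hx, bne_iff_ne, ih]

theorem Fsplit_of_not_mem (c : Char) (l : List Char) (h : c ∉ l) :
    Fsplit c [] l = [l] := by
  rw [Fsplit_eq]
  have hd : l.dropWhile (· != c) = [] := by
    rw [List.dropWhile_eq_nil_iff]; intro x hx; simp [bne_iff_ne]; rintro rfl; exact h hx
  have ht : l.takeWhile (· != c) = l := by
    rw [List.takeWhile_eq_self_iff]; intro x hx; simp [bne_iff_ne]; rintro rfl; exact h hx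
  simp [hd, ht]

theorem two_le_Fsplit_length (c : Char) (l : List Char) (h : c ∈ l) :
    2 ≤ (Fsplit c [] l).length := by
  rw [Fsplit_eq]
  have hd : l.dropWhile (· != c) ≠ [] := by
    intro hnil
    have := (List.dropWhile_eq_nil_iff).mp hnil c h
    simp at this
  cases hdw : l.dropWhile (· != c) with
  | nil => exact absurd hdw hd
  | cons y ys =>
    have : 1 ≤ (Fsplit c [] ys).length := by
      rw [Fsplit_eq]; simp
    simp; omega

theorem isIn_single_iff (c : Char) (l : List Char) :
    PySem.Chars.isIn [c] l = true ↔ c ∈ l := by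
  rw [PySem.Chars.isIn_iff_infix, List.singleton_infix_iff]

theorem isIn_single_false_iff (c : Char) (l : List Char) :
    PySem.Chars.isIn [c] l = false ↔ c ∉ l := by
  rw [PySem.Chars.isIn_eq_false_iff, List.singleton_infix_iff]

-- the B loop over a colon-free prefix in state colons = 0
theorem altLoop_nocolon0 (a : List Char) (h : ':' ∉ a) : ∀ (b : List Char) (l0 : Nat) (h0 : Bool) (l1 : Nat) (h1 : Bool),
    altLoop (a ++ b) 0 l0 h0 l1 h1
      = altLoop b 0 (l0 + a.length) (h0 && a.all (fun c => hexDigits.contains c)) l1 h1 := by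
  induction a with
  | nil => intro b l0 h0 l1 h1; simp
  | cons x xs ih =>
    intro b l0 h0 l1 h1
    have hx : x ≠ ':' := fun hc => h (hc ▸ List.mem_cons_self ..)
    have hxs : ':' ∉ xs := fun hc => h (List.mem_cons_of_mem _ hc)
    have hstep : altLoop ((x :: xs) ++ b) 0 l0 h0 l1 h1
        = altLoop (xs ++ b) 0 (l0 + 1) (h0 && hexDigits.contains x) l1 h1 := by
      simp [altLoop, hx]
    have hn : l0 + 1 + xs.length = l0 + (x :: xs).length := by simp; omega
    have hb : (((h0 && hexDigits.contains x) && xs.all (fun c => hexDigits.contains c)) : Bool)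
        = ((h0 && (x :: xs).all (fun c => hexDigits.contains c)) : Bool) := by
      simp [Bool.and_assoc]
    rw [hstep, ih hxs, hn, hb]

-- the B loop over a colon-free list in state colons = 1
theorem altLoop_nocolon1 (a : List Char) (h : ':' ∉ a) : ∀ (l0 : Nat) (h0 : Bool) (l1 : Nat) (h1 : Bool),
    altLoop a 1 l0 h0 l1 h1
      = some (1, l0, h0, l1 + a.length, h1 && a.all (fun c => hexDigits.contains c)) := by
  induction a with
  | nil => intro l0 h0 l1 h1; simp [altLoop]
  | cons x xs ih =>
    intro l0 h0 l1 h1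
    have hx : x ≠ ':' := fun hc => h (hc ▸ List.mem_cons_self ..)
    have hxs : ':' ∉ xs := fun hc => h (List.mem_cons_of_mem _ hc)
    have hstep : altLoop (x :: xs) 1 l0 h0 l1 h1
        = altLoop xs 1 l0 h0 (l1 + 1) (h1 && hexDigits.contains x) := by
      simp [altLoop, hx]
    have hn : l1 + 1 + xs.length = l1 + (x :: xs).length := by simp; omega
    have hb : (((h1 && hexDigits.contains x) && xs.all (fun c => hexDigits.contains c)) : Bool)
        = ((h1 && (x :: xs).all (fun c => hexDigits.contains c)) : Bool) := by
      simp [Bool.and_assoc]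
    rw [hstep, ih hxs, hn, hb]

-- a second colon aborts the B loop
theorem altLoop_colon1 (a : List Char) (h : ':' ∈ a) : ∀ (l0 : Nat) (h0 : Bool) (l1 : Nat) (h1 : Bool),
    altLoop a 1 l0 h0 l1 h1 = none := by
  induction a with
  | nil => cases h
  | cons x xs ih =>
    intro l0 h0 l1 h1
    by_cases hx : x = ':'
    · simp [altLoop, hx]
    · have hxs : ':' ∈ xs := by
        cases List.mem_cons.mp h with
        | inl he => exact absurd he.symm hx
        | inr hm => exact hm
      simp [altLoop, hx, ih hxs]

-- A's "if len != 32 or not all-hex: return False / True" equals the && form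
theorem guard_hex (n : Nat) (p : Bool) :
    (if ((n != 32) || !p) = true then false else true) = ((n == 32) && p) := by
  by_cases h : n = 32 <;> cases p <;> simp [h]

-- A's two-guard chain over (lm, nt) equals B's one boolean expression
theorem guard_hex2 (e : Bool) (n1 : Nat) (p1 : Bool) (n2 : Nat) (p2 : Bool) :
    (if (!e && ((n1 != 32) || !p1)) = true then false
     else if ((n2 != 32) || !p2) = true then false else true)
    = ((e || ((n1 == 32) && p1)) && ((n2 == 32) && p2)) := by
  cases e <;> cases p1 <;> cases p2 <;> by_cases h1 : n1 = 32 <;> by_cases h2 : n2 = 32 <;>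
    simp [h1, h2]

-- ===== VERDICT (by name: the statement is the Claim_ definition above) =====
theorem validate_hash_format_spec : Claim_equal_validate_hash_format := by
  intro hs _
  unfold Spec_validate_hash_format validate_hash_format validate_hash_format_alt
  by_cases h0 : hs.toList = []
  · simp [h0]
  · simp only [h0, if_false]
    set s := PySem.Chars.strip hs.toList with hsdef
    cases hdw : s.dropWhile (· != ':') with
    | nil =>
      -- no colon in s
      have hmem : ':' ∉ s := by
        intro hm
        have := (List.dropWhile_eq_nil_iff).mp hdw ':' hm
        simp at this
      have hin : PySem.Chars.isIn [':'] s = false := (isIn_single_false_iff _ _).mpr hmem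
      have hB : altLoop s 0 0 true 0 true
          = some (0, s.length, s.all (fun c => hexDigits.contains c), 0, true) := by
        have := altLoop_nocolon0 s hmem [] 0 true 0 true
        simpa [altLoop] using this
      simp only [hin, if_false, Bool.false_eq_true, hB]
      rw [guard_hex]
      simp
    | cons x nt =>
      -- first colon found; x = ':'
      have hx : x = ':' := by
        have := List.dropWhile_get_zero_not (p := (· != ':')) (l := s) (by simp [hdw])
        simpa [hdw] using this
      have hmem : ':' ∈ s := by
        have hx2 : x ∈ s.dropWhile (· != ':') := by simp [hdw]
        rw [hx] at hx2
        exact (List.dropWhile_sublist (· != ':')).subset hx2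
      have hin : PySem.Chars.isIn [':'] s = true := (isIn_single_iff _ _).mpr hmem
      simp only [hin, if_true]
      set lm := s.takeWhile (· != ':') with hlm
      have hparts : PySem.Chars.splitOn s [':'] = lm :: Fsplit ':' [] nt := by
        rw [splitOn_single, Fsplit_eq, hdw]
        rfl
      have hlmnot : ':' ∉ lm := by
        intro hm
        have := List.mem_takeWhile_imp hm
        simp at this
      have hsdecomp : s = lm ++ ':' :: nt := by
        conv_lhs => rw [← List.takeWhile_append_dropWhile (p := (· != ':')) (l := s)]
        rw [hdw, hx, hlm]
      have hB1 : altLoop s 0 0 true 0 true = altLoop nt 1 lm.length (lm.all (fun c => hexDigits.contains c)) 0 true := by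
        rw [hsdecomp, altLoop_nocolon0 lm hlmnot]
        simp [altLoop]
      rw [hparts, hB1]
      by_cases hnt : ':' ∈ nt
      · -- multiple colons: both sides false
        have h2 := two_le_Fsplit_length ':' nt hnt
        have hlen : ((lm :: Fsplit ':' [] nt).length != 2) = true := by
          simp only [List.length_cons, bne_iff_ne]; omega
        rw [hlen, altLoop_colon1 nt hnt]
        simp
      · have hone : Fsplit ':' [] nt = [nt] := Fsplit_of_not_mem ':' nt hnt
        rw [hone, altLoop_nocolon1 nt hnt]
        have hlen : (([lm, nt] : List (List Char)).length != 2) = false := by simp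
        simp only [hlen, if_false, Bool.false_eq_true, Bool.true_and, Nat.zero_add]
        rw [guard_hex2]
        have he : lm.isEmpty = (lm.length == 0) := by cases lm <;> simp
        simp [he]
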